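-- pv_equiv track=rewrite | github.com/Lina-go/Building-Open-Datasets-for-Spanish-Medical-Tasks | src/scripts/gpt_ner_runner.py | convert_to_sentences
-- ===== SOURCE A (Python) =====
-- def convert_to_sentences(tokens_list, tags_list):
--     """Convert token/tag lists to sentence strings with true entities"""
--     sentences = []
--     true_entities_list = []
--
--     for tokens, tags in zip(tokens_list, tags_list):
--         sentence = " ".join(tokens)
--         sentences.append(sentence)
--
--         # Extract true entities
--         entities = []
--         current_entity = []
--         current_type = None
--
--         for token, tag in zip(tokens, tags):
--             if tag.startswith('B-'):
--                 if current_entity: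
--                     entities.append((" ".join(current_entity), current_type))
--                 current_entity = [token]
--                 current_type = tag[2:]
--             elif tag.startswith('I-') and current_entity:
--                 current_entity.append(token)
--             else:
--                 if current_entity:
--                     entities.append((" ".join(current_entity), current_type))
--                 current_entity = []
--                 current_type = None
--
--         if current_entity:
--             entities.append((" ".join(current_entity), current_type))
--
--         true_entities_list.append(entities)
--
--     return sentences, true_entities_list
-- ===== SOURCE B (Python) =====
-- def convert_to_sentences(tokens_list, tags_list):
--     """Convert token/tag lists to sentence strings with true entities"""
--     sentences = []
--     true_entities_list = []
--     for tokens, tags in zip(tokens_list, tags_list):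
--         sentences.append(" ".join(tokens))
--         n = min(len(tokens), len(tags))
--         entities = []
--         i = 0
--         while i < n:
--             if not tags[i].startswith('B-'):
--                 i += 1
--                 continue
--             etype = tags[i][2:]
--             j = i + 1
--             while j < n and tags[j].startswith('I-'):
--                 j += 1
--             entities.append((" ".join(tokens[i:j]), etype))
--             i = j
--         true_entities_list.append(entities)
--     return sentences, true_entities_list
-- ===== Notes on version B (the rewrite author's own statement) =====
-- stated objective: alternative
-- what changed: Entity extraction replaces A's running-accumulator state machine (current_entity/current_type with three flush sites) by a find-B-then-consume-I-run index scan that slices tokens[i:j] per entity; no pending state is carried.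
import Mathlib
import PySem

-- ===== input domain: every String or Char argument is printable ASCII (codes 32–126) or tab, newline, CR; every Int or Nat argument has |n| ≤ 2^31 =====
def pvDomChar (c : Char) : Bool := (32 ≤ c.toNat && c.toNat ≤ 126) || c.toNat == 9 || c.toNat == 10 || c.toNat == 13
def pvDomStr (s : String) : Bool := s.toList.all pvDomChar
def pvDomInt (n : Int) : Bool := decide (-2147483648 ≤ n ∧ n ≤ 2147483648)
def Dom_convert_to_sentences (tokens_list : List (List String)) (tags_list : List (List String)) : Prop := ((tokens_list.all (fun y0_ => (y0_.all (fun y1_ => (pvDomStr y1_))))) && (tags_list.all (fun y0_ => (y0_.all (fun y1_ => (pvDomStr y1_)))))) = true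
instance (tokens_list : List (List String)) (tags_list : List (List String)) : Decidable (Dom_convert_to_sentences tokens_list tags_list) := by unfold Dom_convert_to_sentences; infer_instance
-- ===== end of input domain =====

-- B replaces A's running-accumulator state machine (current_entity/current_type with three flush
-- sites) by a find-B-then-consume-I-run scan that emits each entity as a slice; return values agree.


-- ===== PORT A =====
-- A's inner 'for token, tag in zip(tokens, tags)' loop plus the trailing 'if current_entity' flush,
-- one recursive step per pair, same branch order and same state (entities, current_entity, current_type).
-- current_type is ported as Option String (Python None ↔ none); it is only read at a flush, where
-- current_entity is nonempty and thus current_type is a Some; .getD "" extracts it.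
def pvALoop : List (String × String) → List (String × String) → List String → Option String → List (String × String)
  | [], entities, cur, ctype =>
      if cur.isEmpty then entities
      else entities ++ [(PySem.Str.join " " cur, ctype.getD "")]
  | (token, tag) :: rest, entities, cur, ctype =>
      if PySem.Str.startswith tag "B-" then
        pvALoop rest
          (if cur.isEmpty then entities else entities ++ [(PySem.Str.join " " cur, ctype.getD "")])
          [token] (some (PySem.Str.slice tag (some 2) none))
      else if PySem.Str.startswith tag "I-" && !cur.isEmpty then
        pvALoop rest entities (cur ++ [token]) ctype
      else
        pvALoop rest
          (if cur.isEmpty then entities else entities ++ [(PySem.Str.join " " cur, ctype.getD "")])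
          [] none

def convert_to_sentences (tokens_list : List (List String)) (tags_list : List (List String)) : List String × (List (List (String × String))) :=
  (tokens_list.zip tags_list).foldl
    (fun (acc : List String × List (List (String × String))) p =>
      (acc.1 ++ [PySem.Str.join " " p.1], acc.2 ++ [pvALoop (p.1.zip p.2) [] [] none]))
    ([], [])

-- ===== PORT B =====
-- B's index scan: skip non-'B-' tags; at a 'B-', consume the run of following 'I-' tags
-- (the inner while loop = takeWhile/dropWhile on the remaining pairs), emit the joined slice.
def pvBExtract : List (String × String) → List (String × String)
  | [] => []
  | (token, tag) :: rest =>
      if PySem.Str.startswith tag "B-" then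
        (PySem.Str.join " " (token :: (rest.takeWhile (fun q => PySem.Str.startswith q.2 "I-")).map Prod.fst),
          PySem.Str.slice tag (some 2) none)
        :: pvBExtract (rest.dropWhile (fun q => PySem.Str.startswith q.2 "I-"))
      else pvBExtract rest
  termination_by l => l.length
  decreasing_by
    · exact Nat.lt_succ_of_le (List.length_dropWhile_le _ _)
    · simp

def convert_to_sentences_alt (tokens_list : List (List String)) (tags_list : List (List String)) : List String × (List (List (String × String))) :=
  let pairs := tokens_list.zip tags_list
  (pairs.map (fun p => PySem.Str.join " " p.1),
   pairs.map (fun p => pvBExtract (p.1.zip p.2)))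

-- ===== PRECONDITION & SPEC =====
def Spec_convert_to_sentences (tokens_list : List (List String)) (tags_list : List (List String)) (out : List String × (List (List (String × String)))) : Prop := out = convert_to_sentences_alt tokens_list tags_list
instance (tokens_list : List (List String)) (tags_list : List (List String)) (out : List String × (List (List (String × String)))) : Decidable (Spec_convert_to_sentences tokens_list tags_list out) := by unfold Spec_convert_to_sentences; infer_instance

-- ===== CLAIM (what is proved, stated in full; the proofs are below) =====
def Claim_equal_convert_to_sentences : Prop := ∀ (tokens_list : List (List String)) (tags_list : List (List String)), Dom_convert_to_sentences tokens_list tags_list → Spec_convert_to_sentences tokens_list tags_list (convert_to_sentences tokens_list tags_list)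

-- ===== LEMMAS AND PROOFS =====

-- a tag starting with "B-" does not start with "I-"
theorem pv_B_not_I (tag : String) (h : PySem.Str.startswith tag "B-" = true) :
    PySem.Str.startswith tag "I-" = false := by
  rw [PySem.Str.startswith] at *
  rw [PySem.Chars.startswith_iff] at h
  rw [Bool.eq_false_iff]
  intro hc
  rw [PySem.Chars.startswith_iff] at hc
  obtain ⟨t1, e1⟩ := h
  obtain ⟨t2, e2⟩ := hc
  rw [← e1] at e2
  simp at e2

-- with a pending entity, A's loop absorbs exactly the leading 'I-' run, flushes, and restarts empty
theorem pvALoop_pending (l : List (String × String)) :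
    ∀ (entities : List (String × String)) (cur : List String) (t : Option String),
      cur ≠ [] →
      pvALoop l entities cur t =
        pvALoop (l.dropWhile (fun q => PySem.Str.startswith q.2 "I-"))
          (entities ++ [(PySem.Str.join " "
            (cur ++ (l.takeWhile (fun q => PySem.Str.startswith q.2 "I-")).map Prod.fst), t.getD "")])
          [] none := by
  induction l with
  | nil =>
      intro entities cur t hc
      simp [pvALoop, List.isEmpty_iff, hc]
  | cons p rest ih =>
      intro entities cur t hc
      obtain ⟨token, tag⟩ := p
      by_cases hB : PySem.Str.startswith tag "B-" = true
      · have hB' : PySem.Chars.startswith tag.toList ['B', '-'] = true := by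
          simpa [PySem.Str.startswith] using hB
        have hI' : PySem.Chars.startswith tag.toList ['I', '-'] = false := by
          simpa [PySem.Str.startswith] using pv_B_not_I tag hB
        simp [pvALoop, hB', hI', List.isEmpty_iff, hc, List.takeWhile_cons, List.dropWhile_cons]
      · by_cases hI : PySem.Str.startswith tag "I-" = true
        · have hB' : PySem.Chars.startswith tag.toList ['B', '-'] = false := by
            simpa [PySem.Str.startswith] using hB
          have hI' : PySem.Chars.startswith tag.toList ['I', '-'] = true := by
            simpa [PySem.Str.startswith] using hI
          simp [pvALoop, hB, hB', hI, hI', List.isEmpty_iff, hc,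
            List.takeWhile_cons, List.dropWhile_cons]
          rw [ih _ _ _ (by simp)]
          simp [List.append_assoc]
        · have hB' : PySem.Chars.startswith tag.toList ['B', '-'] = false := by
            simpa [PySem.Str.startswith] using hB
          have hI' : PySem.Chars.startswith tag.toList ['I', '-'] = false := by
            simpa [PySem.Str.startswith] using hI
          simp [pvALoop, hB', hI', List.isEmpty_iff, hc, List.takeWhile_cons,
            List.dropWhile_cons]

-- from the empty state, A's loop computes B's extraction
theorem pvALoop_empty (l : List (String × String)) :
    ∀ (entities : List (String × String)),
      pvALoop l entities [] none = entities ++ pvBExtract l := by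
  induction hl : l.length using Nat.strong_induction_on generalizing l with
  | _ n ih =>
    intro entities
    match l with
    | [] => simp [pvALoop, pvBExtract]
    | (token, tag) :: rest =>
      by_cases hB : PySem.Str.startswith tag "B-" = true
      · have hB' : PySem.Chars.startswith tag.toList ['B', '-'] = true := by
          simpa [PySem.Str.startswith] using hB
        simp [pvALoop, pvBExtract, hB, hB']
        rw [pvALoop_pending rest entities [token] _ (by simp)]
        have hlen : (rest.dropWhile (fun q => PySem.Str.startswith q.2 "I-")).length < n := by
          subst hl
          exact Nat.lt_succ_of_le (List.length_dropWhile_le _ _)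
        rw [ih _ hlen _ rfl]
        simp [List.append_assoc]
      · have hB' : PySem.Chars.startswith tag.toList ['B', '-'] = false := by
          simpa [PySem.Str.startswith] using hB
        have hlen : rest.length < n := by subst hl; simp
        simp [pvALoop, pvBExtract, hB, hB']
        exact ih _ hlen rest rfl entities

-- A's outer foldl with list-append accumulators equals B's two maps
theorem pv_outer (ps : List (List String × List String)) :
    ∀ (s : List String) (e : List (List (String × String))),
      ps.foldl
        (fun (acc : List String × List (List (String × String))) p =>
          (acc.1 ++ [PySem.Str.join " " p.1], acc.2 ++ [pvALoop (p.1.zip p.2) [] [] none]))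
        (s, e)
      = (s ++ ps.map (fun p => PySem.Str.join " " p.1),
         e ++ ps.map (fun p => pvBExtract (p.1.zip p.2))) := by
  induction ps with
  | nil => intro s e; simp
  | cons p rest ih =>
      intro s e
      simp only [List.foldl_cons, List.map_cons]
      rw [ih]
      rw [pvALoop_empty]
      simp

-- ===== VERDICT (by name: the statement is the Claim_ definition above) =====
theorem convert_to_sentences_spec : Claim_equal_convert_to_sentences := by
  intro tokens_list tags_list _
  unfold Spec_convert_to_sentences convert_to_sentences convert_to_sentences_alt
  rw [pv_outer]
  simp
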